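-- pv_equiv track=rewrite | github.com/miguelgondu/enpygma | enpygma.py | plugboardCompleter
-- ===== SOURCE A (Python) =====
-- from string import ascii_lowercase as alphabet
--
-- def plugboardCompleter(plugboard):
--     inverse_plugboard = {v: k for k, v in plugboard.items()}
--     complete_plugboard = {}
--     for letter in alphabet:
--         if letter in plugboard:
--             complete_plugboard[letter] = plugboard[letter]
--         elif letter in inverse_plugboard:
--             complete_plugboard[letter] = inverse_plugboard[letter]
--         else:
--             complete_plugboard[letter] = letter
--     complete_plugboard[' '] = ' '
--     return complete_plugboard
-- ===== SOURCE B (Python) =====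
-- from string import ascii_lowercase as alphabet
--
-- def plugboardCompleter(plugboard):
--     letters = set(alphabet)
--     complete = {letter: letter for letter in alphabet}
--     for k, v in plugboard.items():
--         if v in letters:
--             complete[v] = k
--     for k, v in plugboard.items():
--         if k in letters:
--             complete[k] = v
--     complete[' '] = ' '
--     return complete
-- ===== Notes on version B (the rewrite author's own statement) =====
-- stated objective: alternative
-- what changed: B builds an identity map over the 26 letters and then overrides it with two passes over plugboard.items() (inverse direction first, forward last so the plugboard wins), instead of scanning the alphabet with a three-way membership branch against the plugboard and a precomputed inverse dict; Pre_ only excludes association lists with duplicate keys, which do not represent any Python dict.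
import Mathlib
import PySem

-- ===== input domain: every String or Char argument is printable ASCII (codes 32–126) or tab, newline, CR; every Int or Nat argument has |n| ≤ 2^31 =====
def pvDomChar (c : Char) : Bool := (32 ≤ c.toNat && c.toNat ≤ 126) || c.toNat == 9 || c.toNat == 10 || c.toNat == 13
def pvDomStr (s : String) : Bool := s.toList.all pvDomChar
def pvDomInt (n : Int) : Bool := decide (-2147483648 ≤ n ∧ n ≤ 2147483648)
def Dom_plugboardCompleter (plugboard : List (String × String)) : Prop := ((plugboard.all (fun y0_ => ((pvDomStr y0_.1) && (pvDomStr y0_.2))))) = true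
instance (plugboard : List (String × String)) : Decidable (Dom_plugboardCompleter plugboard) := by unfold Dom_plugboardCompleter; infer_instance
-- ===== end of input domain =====

-- B replaces A's alphabet scan with three-way membership branches by an identity map
-- overridden in two passes over the plugboard items (objective: alternative decomposition).


-- ===== PORT A =====
-- string.ascii_lowercase, iterated letter by letter (each letter a 1-char string)
def pvAlphabet : List String :=
  ["a","b","c","d","e","f","g","h","i","j","k","l","m",
   "n","o","p","q","r","s","t","u","v","w","x","y","z"]

def plugboardCompleter (plugboard : List (String × String)) : List (String × String) :=
  let pb : PySem.Dict String String := PySem.Dict.mk plugboard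
  -- inverse_plugboard = {v: k for k, v in plugboard.items()}
  let inversePlugboard : PySem.Dict String String :=
    plugboard.foldl (fun d p => d.insert p.2 p.1) PySem.Dict.empty
  -- for letter in alphabet: if letter in plugboard … elif letter in inverse_plugboard … else …
  let complete : PySem.Dict String String :=
    pvAlphabet.foldl (fun d letter =>
      match pb.get? letter with
      | some v => d.insert letter v
      | none =>
        match inversePlugboard.get? letter with
        | some k => d.insert letter k
        | none => d.insert letter letter) PySem.Dict.empty
  (complete.insert " " " ").items

-- ===== PORT B =====
def plugboardCompleter_alt (plugboard : List (String × String)) : List (String × String) :=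
  -- complete = {letter: letter for letter in alphabet}
  let base : PySem.Dict String String :=
    pvAlphabet.foldl (fun d letter => d.insert letter letter) PySem.Dict.empty
  -- for k, v in plugboard.items(): if v in letters: complete[v] = k
  let d1 : PySem.Dict String String :=
    plugboard.foldl (fun d p => if p.2 ∈ pvAlphabet then d.insert p.2 p.1 else d) base
  -- for k, v in plugboard.items(): if k in letters: complete[k] = v
  let d2 : PySem.Dict String String :=
    plugboard.foldl (fun d p => if p.1 ∈ pvAlphabet then d.insert p.1 p.2 else d) d1
  (d2.insert " " " ").items

-- ===== PRECONDITION & SPEC =====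
-- Pre_ excludes association lists with duplicate keys: they represent no Python dict (A's
-- parameter is a dict, which cannot hold duplicate keys), and first-vs-last-match behaviour
-- on them is accidental.
def Pre_plugboardCompleter (plugboard : List (String × String)) : Prop :=
  List.Pairwise (fun a b : String × String => a.1 ≠ b.1) plugboard
instance (plugboard : List (String × String)) : Decidable (Pre_plugboardCompleter plugboard) := by unfold Pre_plugboardCompleter; infer_instance

def pvWitness_plugboardCompleter : (List (String × String)) := ([("a", "b")])

def Spec_plugboardCompleter (plugboard : List (String × String)) (out : List (String × String)) : Prop := out = plugboardCompleter_alt plugboard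
instance (plugboard : List (String × String)) (out : List (String × String)) : Decidable (Spec_plugboardCompleter plugboard out) := by unfold Spec_plugboardCompleter; infer_instance

-- ===== CLAIM (what is proved, stated in full; the proofs are below) =====
def Claim_equal_plugboardCompleter : Prop := ∀ (plugboard : List (String × String)), Dom_plugboardCompleter plugboard → Pre_plugboardCompleter plugboard → Spec_plugboardCompleter plugboard (plugboardCompleter plugboard)

-- ===== LEMMAS AND PROOFS =====

-- the value A assigns to a letter
def pvValA (pb inv : PySem.Dict String String) (l : String) : String :=
  match pb.get? l with
  | some v => v
  | none =>
    match inv.get? l with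
    | some k => k
    | none => l

theorem pvStepA (pb inv : PySem.Dict String String) :
    (fun (d : PySem.Dict String String) (letter : String) =>
      match pb.get? letter with
      | some v => d.insert letter v
      | none =>
        match inv.get? letter with
        | some k => d.insert letter k
        | none => d.insert letter letter)
    = fun d letter => d.insert letter (pvValA pb inv letter) := by
  funext d letter
  cases h1 : pb.get? letter with
  | some v => simp [pvValA, h1]
  | none =>
    cases h2 : inv.get? letter with
    | some k => simp [pvValA, h1, h2]
    | none => simp [pvValA, h1, h2]

-- get? on a literal dict is the first matching pair's value
theorem pvGetMkFind (xs : List (String × String)) (l : String) :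
    (PySem.Dict.mk xs).get? l = (xs.find? (fun p => p.1 == l)).map (·.2) := by
  induction xs with
  | nil => rfl
  | cons p xs ih =>
    rw [show PySem.Dict.mk (p :: xs) = PySem.Dict.mk ((p.1, p.2) :: xs) by rfl]
    rw [PySem.Dict.get?_mk_cons, List.find?_cons]
    by_cases h : p.1 = l
    · simp [h]
    · rw [show (p.1 == l) = false by simp [h]]
      simpa using ih

-- with pairwise-distinct keys, the first key match is also the last
theorem pvFindRev (xs : List (String × String)) (l : String)
    (h : List.Pairwise (fun a b : String × String => a.1 ≠ b.1) xs) :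
    xs.reverse.find? (fun p => p.1 == l) = xs.find? (fun p => p.1 == l) := by
  induction xs with
  | nil => rfl
  | cons p xs ih =>
    rw [List.pairwise_cons] at h
    rw [List.reverse_cons, List.find?_append, ih h.2]
    cases hf : xs.find? (fun q => q.1 == l) with
    | none =>
      cases hb : (p.1 == l) <;> simp [hf, hb]
    | some q =>
      have hq : q ∈ xs := List.mem_of_find?_eq_some hf
      have hql : q.1 = l := by
        have := List.find?_some hf
        simpa using this
      have hpl : (p.1 == l) = false := by
        rw [beq_eq_false_iff_ne, ← hql]
        exact h.1 q hq
      simp [hf, hpl]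

-- looking up in the foldl-built inverse dict finds the LAST pair with that value
theorem pvGetSwapFold (xs : List (String × String)) (d : PySem.Dict String String) (l : String) :
    ((xs.foldl (fun d p => d.insert p.2 p.1) d).get? l)
    = match xs.reverse.find? (fun p => p.2 == l) with
      | some p => some p.1
      | none => d.get? l := by
  induction xs generalizing d with
  | nil => rfl
  | cons p xs ih =>
    rw [List.foldl_cons, ih, List.reverse_cons, List.find?_append]
    cases hf : xs.reverse.find? (fun q => q.2 == l) with
    | some q => simp
    | none =>
      have hins := PySem.Dict.get?_insert d p.2 l p.1
      by_cases hpl : l = p.2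
      · simp [hpl]
      · have hb : (p.2 == l) = false := by
          rw [beq_eq_false_iff_ne]
          exact fun hc => hpl hc.symm
        simp [hb, hins, hpl]

-- a fresh fold over the alphabet produces exactly the 26 pairs in order
theorem pvFreshFold (F : String → String) :
    (pvAlphabet.foldl (fun d letter => d.insert letter (F letter)) PySem.Dict.empty).items
    = pvAlphabet.map (fun l => (l, F l)) := by
  have := PySem.Dict.items_foldl_insert_fresh (κ := String) (ν := String)
    pvAlphabet (fun a => a) (fun a => F a) PySem.Dict.empty
    (by intro a _; simp) (by simp [pvAlphabet])
  simpa using this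

-- appending the trailing space entry
theorem pvSpaceInsert (d : PySem.Dict String String) (F : String → String)
    (h : d.items = pvAlphabet.map (fun l => (l, F l))) :
    (d.insert " " " ").items = pvAlphabet.map (fun l => (l, F l)) ++ [(" ", " ")] := by
  have hc : d.contains " " = false := by
    rw [PySem.Dict.contains_eq_decide_mem_keys, PySem.Dict.keys, h]
    simp [pvAlphabet]
  rw [PySem.Dict.items_insert_of_not_contains _ _ hc, h]

-- one guarded override pass over the plugboard, acting on an alphabet-shaped dict
theorem pvLoopItems (key val : String × String → String) (xs : List (String × String))
    (g : String → String) :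
    (xs.foldl (fun d p => if key p ∈ pvAlphabet then d.insert (key p) (val p) else d)
       (PySem.Dict.mk (pvAlphabet.map (fun l => (l, g l))))).items
    = pvAlphabet.map (fun l => (l,
        match xs.reverse.find? (fun p => key p == l) with
        | some p => val p
        | none => g l)) := by
  induction xs generalizing g with
  | nil => simp
  | cons p xs ih =>
    rw [List.foldl_cons]
    by_cases hk : key p ∈ pvAlphabet
    · have hcont : (PySem.Dict.mk (pvAlphabet.map (fun l => (l, g l)))).contains (key p) = true := by
        rw [PySem.Dict.contains_eq_decide_mem_keys, PySem.Dict.keys_mk]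
        simp [hk]
      have hstep : (PySem.Dict.mk (pvAlphabet.map (fun l => (l, g l)))).insert (key p) (val p)
          = PySem.Dict.mk (pvAlphabet.map (fun l => (l, if l = key p then val p else g l))) := by
        apply PySem.Dict.ext
        rw [PySem.Dict.items_insert_of_contains _ _ hcont]
        show ((pvAlphabet.map (fun l => (l, g l))).map
            (fun p' => if (p'.1 == key p) = true then (key p, val p) else p'))
          = pvAlphabet.map (fun l => (l, if l = key p then val p else g l))
        rw [List.map_map]
        apply List.map_congr_left
        intro l _
        by_cases hl : l = key p
        · simp [hl]
        · simp [hl]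
      rw [if_pos hk, hstep, ih]
      simp only [List.reverse_cons]
      apply List.map_congr_left
      intro l _
      rw [List.find?_append]
      cases hf : xs.reverse.find? (fun q => key q == l) with
      | some q => simp
      | none =>
        by_cases hl : l = key p
        · simp [hl]
        · have : (key p == l) = false := by simp; exact fun hc => hl hc.symm
          simp [this, hl]
    · rw [if_neg hk, ih]
      simp only [List.reverse_cons]
      apply List.map_congr_left
      intro l hlmem
      rw [List.find?_append]
      cases hf : xs.reverse.find? (fun q => key q == l) with
      | some q => simp
      | none =>
        have : (key p == l) = false := by
          simp
          intro hc; exact hk (hc ▸ hlmem)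
        simp [this]

-- the base identity dict, as a literal dict
theorem pvBaseMk :
    (pvAlphabet.foldl (fun d letter => d.insert letter letter) PySem.Dict.empty)
    = PySem.Dict.mk (pvAlphabet.map (fun l => (l, l))) := by
  apply PySem.Dict.ext
  rw [pvFreshFold (fun l => l)]

-- ===== VERDICT (by name: the statement is the Claim_ definition above) =====
theorem plugboardCompleter_spec : Claim_equal_plugboardCompleter := by
  intro plugboard _ hpre
  simp only [Spec_plugboardCompleter, plugboardCompleter, plugboardCompleter_alt]
  rw [pvStepA]
  -- A side
  rw [pvSpaceInsert _ _ (pvFreshFold (pvValA (PySem.Dict.mk plugboard)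
        (plugboard.foldl (fun d p => d.insert p.2 p.1) PySem.Dict.empty)))]
  -- B side
  rw [pvBaseMk]
  have h1 := pvLoopItems (fun p => p.2) (fun p => p.1) plugboard (fun x => x)
  beta_reduce at h1
  have hd1 : (plugboard.foldl
        (fun d p => if p.2 ∈ pvAlphabet then d.insert p.2 p.1 else d)
        (PySem.Dict.mk (pvAlphabet.map (fun l => (l, l)))))
      = PySem.Dict.mk (pvAlphabet.map (fun l => (l,
          match plugboard.reverse.find? (fun p => p.2 == l) with
          | some p => p.1
          | none => l))) := PySem.Dict.ext h1
  rw [hd1]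
  rw [pvSpaceInsert _ _ (pvLoopItems (fun p => p.1) (fun p => p.2) plugboard _)]
  -- pointwise equality of the 26 letter values
  congr 1
  apply List.map_congr_left
  intro l _
  have hrev := pvFindRev plugboard l hpre
  rw [hrev]
  cases hf : plugboard.find? (fun p => p.1 == l) with
  | some q => simp [pvValA, pvGetMkFind, hf]
  | none =>
    simp only [pvValA, pvGetMkFind, hf, Option.map_none]
    rw [pvGetSwapFold]
    cases hg : plugboard.reverse.find? (fun p => p.2 == l) with
    | some q => simp
    | none => simp [PySem.Dict.get?_empty]
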